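-- pv_equiv track=rewrite | github.com/rishabh0102/Python-Programming | Connect Four/Main.py | diagonal_grid
-- ===== SOURCE A (Python) =====
-- def create_grid(height, width):
--     """ creates and returns a 2-D list of 0s with the specified dimensions.
--         inputs: height and width are non-negative integers
--     """
--     grid = []
--
--     for r in range(height):
--         row = [0] * width  # a row containing width 0s
--         grid += [row]
--
--     return grid
--
-- def diagonal_grid(height,width):
--
-- 	#FILL IN THIS FUNCTION WITH YOUR CODE.
--     grid = create_grid(height,width)
--     for r in range(height):
--         for c in range(width):
--             if r == c:
--                 grid[r][c] = 1
--     return grid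
--
--     pass
-- ===== SOURCE B (Python) =====
-- def diagonal_grid(height, width):
--     grid = [[0] * width for _ in range(height)]
--     for i in range(min(height, width)):
--         grid[i][i] = 1
--     return grid
-- ===== Notes on version B (the rewrite author's own statement) =====
-- stated objective: simpler
-- what changed: Replaces the nested all-cells scan with its per-cell r==c test by a single loop over range(min(height,width)) that writes the diagonal cells directly; the grid is built by one comprehension instead of repeated list concatenation, removing the quadratic number of conditional tests and the repeated list reallocations.
import Mathlib
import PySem

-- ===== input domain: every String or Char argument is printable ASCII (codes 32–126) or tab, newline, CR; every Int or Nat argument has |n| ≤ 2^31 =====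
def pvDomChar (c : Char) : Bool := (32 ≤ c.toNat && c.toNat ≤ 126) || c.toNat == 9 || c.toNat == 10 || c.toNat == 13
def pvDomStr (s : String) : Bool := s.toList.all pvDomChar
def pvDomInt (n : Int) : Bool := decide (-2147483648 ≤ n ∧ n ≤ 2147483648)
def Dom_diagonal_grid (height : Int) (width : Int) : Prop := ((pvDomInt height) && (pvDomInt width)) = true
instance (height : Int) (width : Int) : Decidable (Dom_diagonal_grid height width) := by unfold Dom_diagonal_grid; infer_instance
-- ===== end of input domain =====

-- B replaces A's nested all-cells scan (with an r == c test at every cell) by one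
-- direct loop over range(min(height,width)) that writes the diagonal cells; same values.

-- ===== PORT A =====
-- create_grid: grid = []; for r in range(height): grid += [[0]*width]
def create_grid (height : Int) (width : Int) : List (List Int) :=
  (PySem.List.pyRange 0 height 1).foldl
    (fun grid _ => grid ++ [List.replicate width.toNat (0 : Int)]) []

-- for r in range(height): for c in range(width): if r == c: grid[r][c] = 1
-- (grid[r][c] = 1 on in-range indices r, c ≥ 0 is List.modify at r.toNat / c.toNat)
def diagonal_grid (height : Int) (width : Int) : List (List Int) :=
  (PySem.List.pyRange 0 height 1).foldl
    (fun grid r =>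
      (PySem.List.pyRange 0 width 1).foldl
        (fun grid c =>
          if r == c then
            grid.modify r.toNat (fun row => row.modify c.toNat (fun _ => (1 : Int)))
          else grid)
        grid)
    (create_grid height width)

-- ===== PORT B =====
-- grid = [[0]*width for _ in range(height)]; for i in range(min(height,width)): grid[i][i] = 1
def diagonal_grid_alt (height : Int) (width : Int) : List (List Int) :=
  (PySem.List.pyRange 0 (min height width) 1).foldl
    (fun grid i => grid.modify i.toNat (fun row => row.modify i.toNat (fun _ => (1 : Int))))
    ((PySem.List.pyRange 0 height 1).map (fun _ => List.replicate width.toNat (0 : Int)))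

-- ===== PRECONDITION & SPEC =====
def Spec_diagonal_grid (height : Int) (width : Int) (out : List (List Int)) : Prop := out = diagonal_grid_alt height width
instance (height : Int) (width : Int) (out : List (List Int)) : Decidable (Spec_diagonal_grid height width out) := by unfold Spec_diagonal_grid; infer_instance

-- ===== CLAIM (what is proved, stated in full; the proofs are below) =====
def Claim_equal_diagonal_grid : Prop := ∀ (height : Int) (width : Int), Dom_diagonal_grid height width → Spec_diagonal_grid height width (diagonal_grid height width)

-- ===== LEMMAS AND PROOFS =====

-- the inner 'for c in range(w): if r == c: …' fires F exactly once, iff 0 ≤ r < w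
theorem inner_fold_eq {α : Type} (F : Int → α → α) (r : Int) (hr : 0 ≤ r) :
    ∀ (n : Nat) (g : α),
      (PySem.List.pyRange 0 n 1).foldl (fun g c => if r == c then F c g else g) g
        = if r < (n : Int) then F r g else g := by
  intro n
  induction n with
  | zero =>
    intro g
    simp
    omega
  | succ n ih =>
    intro g
    have hcast : ((n + 1 : Nat) : Int) = (n : Int) + 1 := by push_cast; ring
    rw [hcast, PySem.List.pyRange_one_succ_right (by positivity), List.foldl_append, ih]
    by_cases h : r = (n : Int)
    · have hlt : ¬ r < (n : Int) := by omega
      simp [h]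
    · have hbe : (r == (n : Int)) = false := by simpa using h
      simp only [List.foldl_cons, List.foldl_nil, hbe]
      by_cases h2 : r < (n : Int)
      · simp [h2, show r < (n : Int) + 1 by omega]
      · simp [h2, show ¬ r < (n : Int) + 1 by omega]

-- the guarded outer loop over range(n) equals the unguarded loop over range(min n w)
theorem outer_fold_eq {α : Type} (w : Int) (F : Int → α → α) :
    ∀ (n : Nat) (g : α),
      (PySem.List.pyRange 0 n 1).foldl (fun g r => if r < w then F r g else g) g
        = (PySem.List.pyRange 0 (min (n : Int) w) 1).foldl (fun g r => F r g) g := by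
  intro n
  induction n with
  | zero =>
    intro g
    simp only [Nat.cast_zero]
    rw [PySem.List.pyRange_one_eq_nil (le_refl (0 : Int)),
        PySem.List.pyRange_one_eq_nil (by omega : min (0 : Int) w ≤ 0)]
    rfl
  | succ n ih =>
    intro g
    have hcast : ((n + 1 : Nat) : Int) = (n : Int) + 1 := by push_cast; ring
    rw [hcast, PySem.List.pyRange_one_succ_right (by positivity), List.foldl_append, ih]
    by_cases h : (n : Int) < w
    · have h1 : min ((n : Int) + 1) w = (n : Int) + 1 := by omega
      have h2 : min ((n : Int)) w = (n : Int) := by omega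
      rw [h1, h2, PySem.List.pyRange_one_succ_right (by positivity), List.foldl_append]
      simp [h]
    · have h1 : min ((n : Int) + 1) w = min ((n : Int)) w := by omega
      simp [h, h1]

theorem diagonal_grid_eq_alt (height width : Int) :
    diagonal_grid height width = diagonal_grid_alt height width := by
  unfold diagonal_grid diagonal_grid_alt create_grid
  rw [PySem.List.foldl_append_singleton_eq_map]
  by_cases hh : 0 ≤ height
  · have hht : ((height.toNat : Nat) : Int) = height := Int.toNat_of_nonneg hh
    have step1 :
        (PySem.List.pyRange 0 height 1).foldl
          (fun grid r =>
            (PySem.List.pyRange 0 width 1).foldl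
              (fun grid c =>
                if r == c then
                  grid.modify r.toNat (fun row => row.modify c.toNat (fun _ => (1 : Int)))
                else grid)
              grid)
          (List.nil ++ (PySem.List.pyRange 0 height 1).map (fun _ => List.replicate width.toNat (0 : Int)))
        = (PySem.List.pyRange 0 height 1).foldl
            (fun grid r =>
              if r < width then
                grid.modify r.toNat (fun row => row.modify r.toNat (fun _ => (1 : Int)))
              else grid)
            (List.nil ++ (PySem.List.pyRange 0 height 1).map (fun _ => List.replicate width.toNat (0 : Int))) := by
      apply PySem.List.foldl_congr_mem
      intro acc r hrmem
      have hr : 0 ≤ r ∧ r < height := (PySem.List.mem_pyRange_one).1 hrmem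
      by_cases hw : 0 ≤ width
      · have hwt : ((width.toNat : Nat) : Int) = width := Int.toNat_of_nonneg hw
        rw [show width = ((width.toNat : Nat) : Int) from hwt.symm,
            inner_fold_eq _ r hr.1 width.toNat acc]
      · rw [PySem.List.pyRange_one_eq_nil (by omega : width ≤ 0)]
        simp only [List.foldl_nil]
        rw [if_neg (by omega)]
    rw [step1]
    rw [show height = ((height.toNat : Nat) : Int) from hht.symm]
    rw [outer_fold_eq width _ height.toNat]
    simp
  · rw [PySem.List.pyRange_one_eq_nil (by omega : height ≤ 0),
        PySem.List.pyRange_one_eq_nil (by omega : min height width ≤ 0)]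
    simp

-- ===== VERDICT (by name: the statement is the Claim_ definition above) =====
theorem diagonal_grid_spec : Claim_equal_diagonal_grid := by
  intro height width _
  exact diagonal_grid_eq_alt height width
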